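-- pv_equiv track=rewrite | github.com/TheBryant/Project-Euler | Euler55.py | helper
-- ===== SOURCE A (Python) =====
-- def helper(num, iter=0):
-- 	s = str(num+int(str(num)[::-1]))
-- 	if s == s[::-1]:
-- 		return True
-- 	else:
-- 		if iter == 50:
-- 			return False
-- 		else:
-- 			return helper(int(s), iter+1)
-- ===== SOURCE B (Python) =====
-- def helper(num, iter=0):
--     # build the whole orbit of reverse-and-add sums, then scan it for a palindrome
--     def orbit(n, k):
--         sums = []
--         for _ in range(k):
--             s = str(n + int(''.join(reversed(str(n)))))
--             sums.append(s)
--             n = int(s)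
--         return sums
--     return any(s == ''.join(reversed(s)) for s in orbit(num, 51 - iter))
-- ===== Notes on version B (the rewrite author's own statement) =====
-- stated objective: alternative
-- what changed: A's early-returning tail recursion carrying (num, iter) becomes a two-stage pipeline: a loop materialises the list of all 51-iter reverse-and-add sums, and a separate any() pass scans that list for a palindrome; correct because A returns True iff some sum in that list is a palindrome.
-- outside the precondition, e.g. on helper(12, 100): A returns True, B returns False; on helper(12, -800): A returns True, B returns True
import Mathlib
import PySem

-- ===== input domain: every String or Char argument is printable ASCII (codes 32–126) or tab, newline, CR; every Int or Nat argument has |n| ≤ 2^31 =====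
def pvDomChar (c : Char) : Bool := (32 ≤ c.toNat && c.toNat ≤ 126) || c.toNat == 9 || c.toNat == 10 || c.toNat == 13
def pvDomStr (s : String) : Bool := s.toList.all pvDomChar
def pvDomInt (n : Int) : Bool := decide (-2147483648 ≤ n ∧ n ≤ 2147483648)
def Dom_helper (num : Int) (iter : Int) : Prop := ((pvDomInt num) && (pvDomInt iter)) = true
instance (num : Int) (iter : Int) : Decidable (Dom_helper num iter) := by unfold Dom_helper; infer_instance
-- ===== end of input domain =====

-- B replaces A's early-returning (num, iter) tail recursion by a two-stage pipeline: materialise the list of all remaining reverse-and-add sums, then scan it with any() for a palindrome (objective: alternative).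


-- ===== PORT A =====
-- s[::-1] is PySem.List.slice? cs none none (-1) (never none for step -1, so .getD [] is never taken);
-- int(...) via PySem.Int.ofChars?; inside Pre_ it always parses, so .getD 0 is never taken.
-- A's recursion ported with fuel = number of remaining calls, (50 - iter).toNat + 1: always
-- enough for the first palindrome check (Python returns True there even for iter > 50), and
-- inside Pre_ the fuel never runs out before the `iter == 50` branch returns.
def helperGo : Nat → Int → Int → Bool
  | 0, _, _ => false
  | fuel + 1, num, iter =>
    let s := PySem.Int.toChars (num +
      ((PySem.Int.ofChars? ((PySem.List.slice? (PySem.Int.toChars num) none none (-1)).getD [])).getD 0))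
    if s = (PySem.List.slice? s none none (-1)).getD [] then true
    else if iter = 50 then false
    else helperGo fuel ((PySem.Int.ofChars? s).getD 0) (iter + 1)

def helper (num : Int) (iter : Int) : Bool := helperGo (((50 : Int) - iter).toNat + 1) num iter

-- ===== PORT B =====
-- orbit(n, k): the list of the k successive reverse-and-add sums, as digit strings;
-- ''.join(reversed(s)) is List.reverse.
def orbitB : Int → Nat → List (List Char)
  | _, 0 => []
  | n, k + 1 =>
    let s := PySem.Int.toChars (n + ((PySem.Int.ofChars? (PySem.Int.toChars n).reverse).getD 0))
    s :: orbitB ((PySem.Int.ofChars? s).getD 0) k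

def helper_alt (num : Int) (iter : Int) : Bool :=
  (orbitB num ((51 : Int) - iter).toNat).any (fun s => s == s.reverse)

-- ===== PRECONDITION & SPEC =====
-- Pre_ excludes: negative num, where int(str(num)[::-1]) raises ValueError; iter > 50, where A's
-- counter can never hit 50 so it recurses until a palindromic sum (True, an accident of the
-- unreachable guard) or RecursionError; and iter < -700, where A's recursion depth (51 - iter
-- calls) exceeds CPython's default recursion limit (RecursionError).
def Pre_helper (num : Int) (iter : Int) : Prop := 0 ≤ num ∧ -700 ≤ iter ∧ iter ≤ 50
instance (num : Int) (iter : Int) : Decidable (Pre_helper num iter) := by unfold Pre_helper; infer_instance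

def pvWitness_helper : Int × Int := (196, 0)

def Spec_helper (num : Int) (iter : Int) (out : Bool) : Prop := out = helper_alt num iter
instance (num : Int) (iter : Int) (out : Bool) : Decidable (Spec_helper num iter out) := by unfold Spec_helper; infer_instance

-- ===== CLAIM =====
def Claim_equal_helper : Prop := ∀ (num : Int) (iter : Int), Dom_helper num iter → Pre_helper num iter → Spec_helper num iter (helper num iter)

-- ===== LEMMAS AND PROOFS =====
-- Alignment: with fuel = (51 - iter).toNat and iter ≤ 50, A's recursion returns true iff some
-- element of B's orbit list is a palindrome — A's `iter = 50` exit is exactly B's orbit ending.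
theorem helperGo_eq_any (fuel : Nat) : ∀ (num iter : Int), iter ≤ 50 →
    fuel = ((51 : Int) - iter).toNat →
    helperGo fuel num iter = (orbitB num fuel).any (fun s => s == s.reverse) := by
  induction fuel with
  | zero => intro num iter h50 hf; omega
  | succ f ih =>
    intro num iter h50 hf
    simp only [helperGo, orbitB, List.any_cons, PySem.List.slice?_none_none_neg_one, Option.getD_some]
    by_cases hpal :
        PySem.Int.toChars (num + ((PySem.Int.ofChars? (PySem.Int.toChars num).reverse).getD 0)) =
        (PySem.Int.toChars (num + ((PySem.Int.ofChars? (PySem.Int.toChars num).reverse).getD 0))).reverse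
    · rw [if_pos hpal, beq_iff_eq.mpr hpal, Bool.true_or]
    · rw [if_neg hpal, beq_eq_false_iff_ne.mpr hpal, Bool.false_or]
      by_cases hiter : iter = 50
      · have : f = 0 := by omega
        subst this
        simp only [if_pos hiter, orbitB, List.any_nil]
      · rw [if_neg hiter, ih _ (iter + 1) (by omega) (by omega)]

-- ===== VERDICT =====
theorem helper_spec : Claim_equal_helper := by
  intro num iter _ hpre
  obtain ⟨-, -, h50⟩ := hpre
  unfold Spec_helper helper helper_alt
  have hf : ((50 : Int) - iter).toNat + 1 = ((51 : Int) - iter).toNat := by omega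
  rw [hf]
  exact helperGo_eq_any _ num iter h50 rfl
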